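-- pv_equiv track=rewrite | github.com/DeNeutoy/crosswords | cross/explain_scraper.py | parse_solutions
-- ===== SOURCE A (Python) =====
-- def parse_solutions(solutions):
--
--     context = []
--     clues = []
--     seen_clues = False
--     for line in solutions:
--         if not line[0].isnumeric() and not seen_clues:
--             # There is some introduction to the crossword
--             context.append(line)
--
--         elif not line[0].isnumeric():
--             # solution wrapped a line, because it was long.
--             clues[-1] = clues[-1] + " " + line
--         else:
--             seen_clues = True
--             clues.append(line)
--
--     return {"solutions": clues, "context": context}
-- ===== SOURCE B (Python) =====
-- def parse_solutions(solutions):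
--     # Phase 1: peel off the leading context (lines before the first digit-led line).
--     i = 0
--     while i < len(solutions) and not solutions[i][0].isnumeric():
--         i += 1
--     context = solutions[:i]
--     # Phase 2: fold the remainder into clues; no 'seen' flag needed.
--     clues = []
--     for line in solutions[i:]:
--         if line[0].isnumeric():
--             clues.append(line)
--         else:
--             clues[-1] = clues[-1] + " " + line
--     return {"solutions": clues, "context": context}
-- ===== Notes on version B (the rewrite author's own statement) =====
-- stated objective: simpler
-- what changed: Replaces the single stateful pass with a seen_clues flag by a two-phase decomposition: a prefix scan splits off the context, then a flagless fold over the remainder builds the clues.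
import Mathlib
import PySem

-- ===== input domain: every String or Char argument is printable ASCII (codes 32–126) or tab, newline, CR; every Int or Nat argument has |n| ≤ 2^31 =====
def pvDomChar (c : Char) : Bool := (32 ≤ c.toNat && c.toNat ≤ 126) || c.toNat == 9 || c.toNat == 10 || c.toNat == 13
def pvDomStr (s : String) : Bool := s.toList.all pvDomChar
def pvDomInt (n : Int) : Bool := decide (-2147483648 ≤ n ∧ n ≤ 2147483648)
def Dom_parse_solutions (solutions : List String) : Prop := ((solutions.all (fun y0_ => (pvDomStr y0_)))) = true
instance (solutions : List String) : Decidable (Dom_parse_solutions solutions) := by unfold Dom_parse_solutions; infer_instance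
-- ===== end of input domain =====

-- B replaces A's one stateful pass with a seen_clues flag by a two-phase decomposition
-- (prefix scan for the context, then a flagless fold for the clues); objective: simpler.

-- ===== PORT A =====
-- line[0].isnumeric(): on the ASCII domain this is exactly 'first char is a digit'.
-- (On the empty string Python raises IndexError; such inputs are outside Pre_.)
def pvFirstNum (line : String) : Bool :=
  match line.toList with
  | c :: _ => c.isDigit
  | [] => false

-- clues[-1] = clues[-1] + " " + line  (only reached with clues nonempty)
def pvAppendLast (clues : List String) (line : String) : List String :=
  match clues with
  | [] => []
  | [x] => [x ++ " " ++ line]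
  | x :: xs => x :: pvAppendLast xs line

def pvStepA (st : List String × List String × Bool) (line : String) :
    List String × List String × Bool :=
  if !pvFirstNum line && !st.2.2 then (st.1 ++ [line], st.2.1, st.2.2)
  else if !pvFirstNum line then (st.1, pvAppendLast st.2.1 line, st.2.2)
  else (st.1, st.2.1 ++ [line], true)

def parse_solutions (solutions : List String) : List (String × List String) :=
  let st := solutions.foldl pvStepA ([], [], false)
  [("solutions", st.2.1), ("context", st.1)]

-- ===== PORT B =====
def pvStepB (clues : List String) (line : String) : List String :=
  if pvFirstNum line then clues ++ [line] else pvAppendLast clues line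

def parse_solutions_alt (solutions : List String) : List (String × List String) :=
  let context := solutions.takeWhile (fun l => !pvFirstNum l)
  let clues := (solutions.dropWhile (fun l => !pvFirstNum l)).foldl pvStepB []
  [("solutions", clues), ("context", context)]

-- ===== PRECONDITION & SPEC =====
-- Pre_ excludes lists containing an empty-string line, on which A raises IndexError at line[0].
def Pre_parse_solutions (solutions : List String) : Prop :=
  ∀ s ∈ solutions, s ≠ ""
instance (solutions : List String) : Decidable (Pre_parse_solutions solutions) := by
  unfold Pre_parse_solutions; infer_instance

def pvWitness_parse_solutions : List String := ["Intro text", "1. first clue", "wrapped line", "2. second"]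

def Spec_parse_solutions (solutions : List String) (out : List (String × List String)) : Prop := out = parse_solutions_alt solutions
instance (solutions : List String) (out : List (String × List String)) : Decidable (Spec_parse_solutions solutions out) := by unfold Spec_parse_solutions; infer_instance

-- ===== CLAIM (what is proved, stated in full; the proofs are below) =====
def Claim_equal_parse_solutions : Prop := ∀ (solutions : List String), Dom_parse_solutions solutions → Pre_parse_solutions solutions → Spec_parse_solutions solutions (parse_solutions solutions)

-- ===== LEMMAS AND PROOFS =====

-- Once seen_clues is true, A's fold leaves the context alone and acts as pvStepB on the clues.
theorem foldA_seen (rest : List String) (ctx clues : List String) :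
    rest.foldl pvStepA (ctx, clues, true) = (ctx, rest.foldl pvStepB clues, true) := by
  induction rest generalizing clues with
  | nil => rfl
  | cons h t ih =>
      simp only [List.foldl_cons, pvStepA, pvStepB]
      by_cases hd : pvFirstNum h = true <;> simp [hd, ih]

theorem foldA_split (l : List String) (ctx : List String) :
    (l.foldl pvStepA (ctx, [], false)).1 = ctx ++ l.takeWhile (fun s => !pvFirstNum s) ∧
    (l.foldl pvStepA (ctx, [], false)).2.1 =
      (l.dropWhile (fun s => !pvFirstNum s)).foldl pvStepB [] := by
  induction l generalizing ctx with
  | nil => simp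
  | cons h t ih =>
      by_cases hd : pvFirstNum h = true
      · simp only [List.foldl_cons, pvStepA, hd]
        simp [foldA_seen, List.takeWhile_cons, List.dropWhile_cons, hd, pvStepB]
      · simp only [List.foldl_cons, pvStepA, Bool.not_eq_true] at *
        simp [hd, List.takeWhile_cons, List.dropWhile_cons, ih (ctx ++ [h])]

-- ===== VERDICT (by name: the statement is the Claim_ definition above) =====
theorem parse_solutions_spec : Claim_equal_parse_solutions := by
  intro solutions _ _
  unfold Spec_parse_solutions parse_solutions parse_solutions_alt
  obtain ⟨h1, h2⟩ := foldA_split solutions []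
  simp only [h1, h2, List.nil_append]
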